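-- pv_equiv track=rewrite | github.com/TheManOfTeel/foobar | level-5/challenge-1/expanding-nebula.py | get_pre_images
-- ===== SOURCE A (Python) =====
-- def get_pre_images(col):
--     options = ((0, 0), (0, 1), (1, 0), (1, 1))
--     # Apply rules of devolving to get current
--     curr_col = devolve[col[0]]
--     # Generate map
--     for i in range(1, len(col)):
--         new = []
--         for elem in curr_col:
--             for option in options:
--                 # Apply the rules of evolution
--                 if evolve[(elem[i], option)] == col[i]:
--                     new.append(elem + (option,))
--         curr_col = tuple(new)
--     body = [tuple(zip(*i)) for i in curr_col]
--     return [tuple([get_bit(t) for t in tuples]) for tuples in body]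
--
-- def get_bit(bits):
--     return_bit = 0
--     for bit in bits:
--         return_bit = (return_bit << 1) | bit
--     return return_bit
--
-- evolve = {
--         ((0, 0), (0, 0)): 0,
--         ((0, 0), (0, 1)): 1,
--         ((0, 0), (1, 0)): 1,
--         ((0, 0), (1, 1)): 0,
--         ((0, 1), (0, 0)): 1,
--         ((0, 1), (0, 1)): 0,
--         ((0, 1), (1, 0)): 0,
--         ((0, 1), (1, 1)): 0,
--         ((1, 0), (0, 0)): 1,
--         ((1, 0), (0, 1)): 0,
--         ((1, 0), (1, 0)): 0,
--         ((1, 0), (1, 1)): 0,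
--         ((1, 1), (0, 0)): 0,
--         ((1, 1), (0, 1)): 0,
--         ((1, 1), (1, 0)): 0,
--         ((1, 1), (1, 1)): 0
--         }
--
-- devolve = {
--         0: (((0, 0),(0, 0)),
--             ((0, 0), (1, 1)),
--             ((0, 1), (0, 1)),
--             ((0, 1), (1, 0)),
--             ((0, 1), (1, 1)),
--             ((1, 0), (0, 1)),
--             ((1, 0), (1, 0)),
--             ((1, 0), (1, 1)),
--             ((1, 1), (0, 0)),
--             ((1, 1), (0, 1)),
--             ((1, 1), (1, 0)),
--             ((1, 1), (1, 1))),
--         1: (((1, 0), (0, 0)),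
--             ((0, 1), (0, 0)),
--             ((0, 0), (1, 0)),
--             ((0, 0), (0, 1)))}
-- ===== SOURCE B (Python) =====
-- # B: recursive backtracking (DFS) over column indices instead of A's layer-by-layer
-- # breadth-first regeneration of the whole candidate list at every row.
-- evolve = {
--         ((0, 0), (0, 0)): 0,
--         ((0, 0), (0, 1)): 1,
--         ((0, 0), (1, 0)): 1,
--         ((0, 0), (1, 1)): 0,
--         ((0, 1), (0, 0)): 1,
--         ((0, 1), (0, 1)): 0,
--         ((0, 1), (1, 0)): 0,
--         ((0, 1), (1, 1)): 0,
--         ((1, 0), (0, 0)): 1,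
--         ((1, 0), (0, 1)): 0,
--         ((1, 0), (1, 0)): 0,
--         ((1, 0), (1, 1)): 0,
--         ((1, 1), (0, 0)): 0,
--         ((1, 1), (0, 1)): 0,
--         ((1, 1), (1, 0)): 0,
--         ((1, 1), (1, 1)): 0
--         }
--
-- devolve = {
--         0: (((0, 0), (0, 0)),
--             ((0, 0), (1, 1)),
--             ((0, 1), (0, 1)),
--             ((0, 1), (1, 0)),
--             ((0, 1), (1, 1)),
--             ((1, 0), (0, 1)),
--             ((1, 0), (1, 0)),
--             ((1, 0), (1, 1)),
--             ((1, 1), (0, 0)),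
--             ((1, 1), (0, 1)),
--             ((1, 1), (1, 0)),
--             ((1, 1), (1, 1))),
--         1: (((1, 0), (0, 0)),
--             ((0, 1), (0, 0)),
--             ((0, 0), (1, 0)),
--             ((0, 0), (0, 1)))}
--
-- def get_bit(bits):
--     return_bit = 0
--     for bit in bits:
--         return_bit = (return_bit << 1) | bit
--     return return_bit
--
-- def get_pre_images(col):
--     options = ((0, 0), (0, 1), (1, 0), (1, 1))
--     n = len(col)
--
--     def extend(cand, i):
--         if i == n:
--             return [cand]
--         out = []
--         for option in options:
--             if evolve[(cand[-1], option)] == col[i]: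
--                 out.extend(extend(cand + (option,), i + 1))
--         return out
--
--     results = []
--     for seed in devolve[col[0]]:
--         results.extend(extend(seed, 1))
--     return [tuple([get_bit([p[0] for p in c]), get_bit([p[1] for p in c])])
--             for c in results]
-- ===== Notes on version B (the rewrite author's own statement) =====
-- stated objective: alternative
-- what changed: Replaces A's breadth-first layer-by-layer rebuild of the whole candidate list at every row with a recursive depth-first backtracking search over column indices that emits each completed candidate directly.
import Mathlib
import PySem

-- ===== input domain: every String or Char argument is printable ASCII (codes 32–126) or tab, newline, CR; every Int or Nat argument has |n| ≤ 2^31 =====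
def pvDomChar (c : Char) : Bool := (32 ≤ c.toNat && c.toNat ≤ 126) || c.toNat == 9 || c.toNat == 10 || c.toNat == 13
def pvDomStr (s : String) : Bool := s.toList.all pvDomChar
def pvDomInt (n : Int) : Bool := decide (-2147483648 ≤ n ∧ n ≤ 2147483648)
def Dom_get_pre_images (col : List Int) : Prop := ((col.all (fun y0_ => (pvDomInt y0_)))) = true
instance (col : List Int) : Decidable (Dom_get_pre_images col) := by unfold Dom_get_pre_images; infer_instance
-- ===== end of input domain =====

-- B enumerates the pre-image candidates by recursive depth-first backtracking over the
-- column indices instead of A's breadth-first layer-by-layer rebuild; same return value.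

-- shared module-level constants of the Python file (used by both A and B):
-- the `evolve` dict as a lookup chain in its key order; the final `else 0` arms are
-- unreachable defaults — both arguments are always pairs of zero/one bits at every call site.
def evolveK (e o : Int × Int) : Int :=
  if e = (0, 0) then
    (if o = (0, 0) then 0 else if o = (0, 1) then 1 else if o = (1, 0) then 1 else 0)
  else if e = (0, 1) then (if o = (0, 0) then 1 else 0)
  else if e = (1, 0) then (if o = (0, 0) then 1 else 0)
  else 0

def devolve0 : List (List (Int × Int)) :=
  [[(0,0),(0,0)], [(0,0),(1,1)], [(0,1),(0,1)], [(0,1),(1,0)], [(0,1),(1,1)],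
   [(1,0),(0,1)], [(1,0),(1,0)], [(1,0),(1,1)], [(1,1),(0,0)], [(1,1),(0,1)],
   [(1,1),(1,0)], [(1,1),(1,1)]]

def devolve1 : List (List (Int × Int)) :=
  [[(1,0),(0,0)], [(0,1),(0,0)], [(0,0),(1,0)], [(0,0),(0,1)]]

def optionsL : List (Int × Int) := [(0,0), (0,1), (1,0), (1,1)]

-- get_bit: (return_bit << 1) | bit, folded over the bits
def get_bit (bits : List Int) : Int :=
  bits.foldl (fun acc b => PySem.Int.bor (acc <<< 1) b) 0

-- ===== PORT A =====
def get_pre_images (col : List Int) : List (List Int) :=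
  match col with
  | [] => []          -- col[0] raises IndexError; excluded by Pre_
  | c0 :: _ =>
    -- devolve[col[0]]: KeyError unless col[0] is zero or one; other values excluded by Pre_
    let curr0 := if c0 = 0 then devolve0 else if c0 = 1 then devolve1 else []
    let fin := (PySem.List.pyRange 1 (col.length : Int) 1).foldl (fun curr j =>
      curr.foldl (fun nw elem =>
        optionsL.foldl (fun nw o =>
          -- elem[i] is always in range (len(elem) = i+1), so the default is never used
          if evolveK (PySem.List.pyGetD elem j (0, 0)) o = PySem.List.pyGetD col j 0
          then nw ++ [elem ++ [o]] else nw) nw) []) curr0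
    -- body = [tuple(zip(*i)) …]; each i has exactly two components per pair
    fin.map (fun c => [get_bit (c.map Prod.fst), get_bit (c.map Prod.snd)])

-- ===== PORT B =====
-- `extend(cand, i)`; Python tests `if i == n: return [cand]` first — the branch order is
-- flipped here (equivalent: every call has i ≤ n) so the recursion is visibly decreasing;
-- the 4-iteration `for option in options` loop is unrolled.
def extendB (col : List Int) (n : Nat) (cand : List (Int × Int)) (i : Nat) :
    List (List (Int × Int)) :=
  if i < n then
    -- cand[-1] is always defined (len(cand) ≥ 2), so the default is never used
    let test := fun (o : Int × Int) =>
      evolveK (PySem.List.pyGetD cand (-1) (0, 0)) o = PySem.List.pyGetD col (i : Int) 0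
    let s1 := if test (0,0) then [] ++ extendB col n (cand ++ [(0,0)]) (i+1) else []
    let s2 := if test (0,1) then s1 ++ extendB col n (cand ++ [(0,1)]) (i+1) else s1
    let s3 := if test (1,0) then s2 ++ extendB col n (cand ++ [(1,0)]) (i+1) else s2
    let s4 := if test (1,1) then s3 ++ extendB col n (cand ++ [(1,1)]) (i+1) else s3
    s4
  else [cand]
termination_by n - i

def get_pre_images_alt (col : List Int) : List (List Int) :=
  match col with
  | [] => []          -- col[0] raises IndexError; excluded by Pre_
  | c0 :: _ =>
    let seeds := if c0 = 0 then devolve0 else if c0 = 1 then devolve1 else []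
    let results := seeds.foldl (fun res s => res ++ extendB col col.length s 1) []
    results.map (fun c => [get_bit (c.map Prod.fst), get_bit (c.map Prod.snd)])

-- ===== PRECONDITION & SPEC =====
-- Python raises (IndexError on empty col, KeyError on devolve[col[0]]) unless col is
-- non-empty with a zero-or-one first element; exactly those inputs are excluded.
def Pre_get_pre_images (col : List Int) : Prop :=
  col ≠ [] ∧ (col.headI = 0 ∨ col.headI = 1)
instance (col : List Int) : Decidable (Pre_get_pre_images col) := by
  unfold Pre_get_pre_images; infer_instance
def pvWitness_get_pre_images : List Int := ([1, 0, 1])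

def Spec_get_pre_images (col : List Int) (out : List (List Int)) : Prop :=
  out = get_pre_images_alt col
instance (col : List Int) (out : List (List Int)) : Decidable (Spec_get_pre_images col out) := by
  unfold Spec_get_pre_images; infer_instance

-- ===== CLAIM (what is proved, stated in full; the proofs are below) =====
def Claim_equal_get_pre_images : Prop :=
  ∀ (col : List Int), Dom_get_pre_images col → Pre_get_pre_images col →
    Spec_get_pre_images col (get_pre_images col)

-- ===== LEMMAS AND PROOFS =====

-- indexing a candidate of length i+1 at i is indexing it at -1 (its last element)
lemma pyGetD_last_of_length {α : Type} (e : List α) (i : Nat) (d : α)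
    (h : e.length = i + 1) :
    PySem.List.pyGetD e (i : Int) d = PySem.List.pyGetD e (-1) d := by
  have hne : e ≠ [] := by intro he; simp [he] at h
  rw [PySem.List.pyGetD_neg_one e d hne, List.getLast_eq_getElem,
    PySem.List.pyGetD_natCast]
  simp [List.getD_eq_getElem?_getD, h]

-- one BFS layer of A, written as a flatMap of per-candidate one-step extensions
lemma layer_eq_flatMap (col : List Int) (j : Int) (curr : List (List (Int × Int))) :
    curr.foldl (fun nw elem =>
      optionsL.foldl (fun nw o =>
        if evolveK (PySem.List.pyGetD elem j (0, 0)) o = PySem.List.pyGetD col j 0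
        then nw ++ [elem ++ [o]] else nw) nw) []
    = curr.flatMap (fun e =>
        (optionsL.filter (fun o =>
          decide (evolveK (PySem.List.pyGetD e j (0, 0)) o = PySem.List.pyGetD col j 0))).map
          (fun o => e ++ [o])) := by
  have hinner : ∀ (nw : List (List (Int × Int))) (e : List (Int × Int)),
      optionsL.foldl (fun nw o =>
        if evolveK (PySem.List.pyGetD e j (0, 0)) o = PySem.List.pyGetD col j 0
        then nw ++ [e ++ [o]] else nw) nw
      = nw ++ (optionsL.filter (fun o =>
          decide (evolveK (PySem.List.pyGetD e j (0, 0)) o = PySem.List.pyGetD col j 0))).map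
          (fun o => e ++ [o]) := by
    intro nw e
    exact PySem.List.foldl_append_ite _ _ optionsL nw
  have hfun : (fun (nw : List (List (Int × Int))) elem =>
      optionsL.foldl (fun nw o =>
        if evolveK (PySem.List.pyGetD elem j (0, 0)) o = PySem.List.pyGetD col j 0
        then nw ++ [elem ++ [o]] else nw) nw)
      = (fun nw elem => nw ++ (optionsL.filter (fun o =>
          decide (evolveK (PySem.List.pyGetD elem j (0, 0)) o = PySem.List.pyGetD col j 0))).map
          (fun o => elem ++ [o])) := by
    funext nw e; exact hinner nw e
  rw [hfun, PySem.List.foldl_append_eq_flatMap]; rfl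

-- one step of A on a single candidate, continued by DFS, equals the DFS call itself
lemma step_flatMap_extendB (col : List Int) (n i : Nat) (e : List (Int × Int))
    (hlen : e.length = i + 1) (hin : i < n) :
    ((optionsL.filter (fun o =>
        decide (evolveK (PySem.List.pyGetD e (i : Int) (0, 0)) o = PySem.List.pyGetD col (i : Int) 0))).map
        (fun o => e ++ [o])).flatMap (fun e' => extendB col n e' (i + 1))
    = extendB col n e i := by
  rw [pyGetD_last_of_length e i _ hlen]
  rw [extendB]
  simp only [if_pos hin, optionsL]
  generalize PySem.List.pyGetD col (i : Int) 0 = c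
  by_cases h1 : evolveK (PySem.List.pyGetD e (-1) (0, 0)) (0, 0) = c <;>
  by_cases h2 : evolveK (PySem.List.pyGetD e (-1) (0, 0)) (0, 1) = c <;>
  by_cases h3 : evolveK (PySem.List.pyGetD e (-1) (0, 0)) (1, 0) = c <;>
  by_cases h4 : evolveK (PySem.List.pyGetD e (-1) (0, 0)) (1, 1) = c <;>
  simp [h1, h2, h3, h4, List.filter]

-- the layered BFS from row i to the end equals DFS from row i, candidate by candidate
lemma layers_eq_flatMap (col : List Int) :
    ∀ (k i : Nat) (curr : List (List (Int × Int))),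
      i + k = col.length → (∀ e ∈ curr, e.length = i + 1) →
      (PySem.List.pyRange (i : Int) (col.length : Int) 1).foldl (fun curr j =>
        curr.foldl (fun nw elem =>
          optionsL.foldl (fun nw o =>
            if evolveK (PySem.List.pyGetD elem j (0, 0)) o = PySem.List.pyGetD col j 0
            then nw ++ [elem ++ [o]] else nw) nw) []) curr
      = curr.flatMap (fun e => extendB col col.length e i) := by
  intro k
  induction k with
  | zero =>
    intro i curr hik _
    have hi : i = col.length := by omega
    rw [PySem.List.pyRange_one_eq_nil (by exact_mod_cast le_of_eq hi.symm)]
    simp only [List.foldl_nil]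
    subst hi
    have : ∀ e : List (Int × Int), extendB col col.length e col.length = [e] := by
      intro e; rw [extendB]; simp
    simp [this]
  | succ k ih =>
    intro i curr hik hlen
    have hilt : i < col.length := by omega
    rw [PySem.List.pyRange_one_cons (by exact_mod_cast hilt)]
    rw [List.foldl_cons]
    have hcast : ((i : Int) + 1) = ((i + 1 : Nat) : Int) := by push_cast; ring
    rw [hcast]
    rw [layer_eq_flatMap col (i : Int) curr]
    rw [ih (i + 1) _ (by omega) ?_]
    · rw [List.flatMap_assoc]
      apply List.flatMap_congr  -- pointwise over curr
      intro e he
      have hstep := step_flatMap_extendB col col.length i e (hlen e he) hilt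
      simpa using hstep
    · intro e' he'
      simp only [List.mem_flatMap, List.mem_map, List.mem_filter] at he'
      obtain ⟨e, he, o, ⟨_, _⟩, rfl⟩ := he'
      simp [hlen e he]

-- B's seed loop is the flatMap of the per-seed DFS
lemma seeds_foldl_eq_flatMap (col : List Int) (seeds : List (List (Int × Int))) :
    seeds.foldl (fun res s => res ++ extendB col col.length s 1) []
    = seeds.flatMap (fun s => extendB col col.length s 1) :=
  PySem.List.foldl_append_eq_flatMap _ seeds []

-- ===== VERDICT (by name: the statement is the Claim_ definition above) =====
theorem get_pre_images_spec : Claim_equal_get_pre_images := by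
  intro col _ hpre
  obtain ⟨hne, hhead⟩ := hpre
  unfold Spec_get_pre_images
  cases col with
  | nil => exact absurd rfl hne
  | cons c0 rest =>
    simp only [List.headI] at hhead
    unfold get_pre_images get_pre_images_alt
    simp only
    rw [seeds_foldl_eq_flatMap]
    congr 1
    have hseedlen : ∀ e ∈ (if c0 = 0 then devolve0 else if c0 = 1 then devolve1 else []),
        e.length = 1 + 1 := by
      rcases hhead with h | h <;> subst h <;> decide
    have hlay := layers_eq_flatMap (c0 :: rest) rest.length 1
      (if c0 = 0 then devolve0 else if c0 = 1 then devolve1 else [])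
      (by simp [Nat.add_comm]) hseedlen
    simp only [Nat.cast_one] at hlay
    rw [hlay]
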